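-- pv_equiv track=rewrite | github.com/ilikepegasi/CSCI1133 | homework/hw06.py | all_names
-- ===== SOURCE A (Python) =====
-- def all_names(first_names, last_names, length):
--     '''
--     Purpose:
--         Finds all combinations of two inputted lists of strings that have a
--         length equivalent to an inputted length value
--     Parameter(s):
--         first_names: the list of possible first names (list)
--         last_names: the list of possible last names (list)
--         length: the desired length for the strings in the returned list (int)
--     Return Value:
--         A list of all the strings from the possible combinations of input values with length
--         equivalent to the inputted length value (list)
--     '''
--
--     valid_names = []
--     for first_name in first_names:
--         for last_name in last_names:
--             possible_name = f"{first_name} {last_name}"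
--             if len(possible_name) == length:
--                 valid_names.append(possible_name)
--     return valid_names
-- ===== SOURCE B (Python) =====
-- def all_names(first_names, last_names, length):
--     buckets = {}
--     for last_name in last_names:
--         k = len(last_name)
--         buckets[k] = buckets.get(k, []) + [last_name]
--     valid_names = []
--     for first_name in first_names:
--         for last_name in buckets.get(length - len(first_name) - 1, []):
--             valid_names.append(f"{first_name} {last_name}")
--     return valid_names
-- ===== Notes on version B (the rewrite author's own statement) =====
-- stated objective: faster
-- what changed: B buckets last_names by length in a dict built once, then for each first name looks up only the bucket of the single matching length, replacing A's full inner scan over last_names.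
import Mathlib
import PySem

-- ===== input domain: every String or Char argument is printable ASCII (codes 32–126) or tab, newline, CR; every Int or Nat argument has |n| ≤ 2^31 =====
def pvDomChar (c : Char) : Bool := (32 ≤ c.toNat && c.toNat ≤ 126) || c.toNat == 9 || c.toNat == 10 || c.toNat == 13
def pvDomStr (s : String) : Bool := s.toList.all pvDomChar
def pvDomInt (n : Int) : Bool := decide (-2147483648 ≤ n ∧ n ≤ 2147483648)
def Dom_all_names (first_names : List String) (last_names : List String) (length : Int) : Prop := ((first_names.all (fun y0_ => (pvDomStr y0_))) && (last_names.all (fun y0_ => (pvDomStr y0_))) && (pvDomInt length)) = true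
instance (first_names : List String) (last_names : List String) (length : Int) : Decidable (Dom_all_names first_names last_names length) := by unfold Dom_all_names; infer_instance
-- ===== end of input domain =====

-- B buckets last_names by length in a dict built once, so each first name scans only the single matching-length bucket (asymptotically faster than A's full inner scan).


-- ===== PORT A =====
-- nested loops: for each first_name scan all of last_names, append "first last" when its length matches
def all_names (first_names : List String) (last_names : List String) (length : Int) : List String :=
  first_names.foldl (fun valid_names first_name =>
    last_names.foldl (fun valid_names last_name =>
      let possible_name := first_name ++ " " ++ last_name
      if PySem.Str.len possible_name = length then valid_names ++ [possible_name] else valid_names)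
      valid_names)
    []

-- ===== PORT B =====
-- bucket last_names by length once; then each first_name reads only its matching-length bucket
def all_names_alt (first_names : List String) (last_names : List String) (length : Int) : List String :=
  let buckets : PySem.Dict Int (List String) :=
    last_names.foldl (fun buckets last_name =>
      let k := PySem.Str.len last_name
      buckets.insert k (buckets.getD k [] ++ [last_name])) PySem.Dict.empty
  first_names.foldl (fun valid_names first_name =>
    (buckets.getD (length - PySem.Str.len first_name - 1) []).foldl
      (fun valid_names last_name => valid_names ++ [first_name ++ " " ++ last_name])
      valid_names)
    []

-- ===== PRECONDITION & SPEC =====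
def Spec_all_names (first_names : List String) (last_names : List String) (length : Int) (out : List String) : Prop := out = all_names_alt first_names last_names length
instance (first_names : List String) (last_names : List String) (length : Int) (out : List String) : Decidable (Spec_all_names first_names last_names length out) := by unfold Spec_all_names; infer_instance

-- ===== CLAIM (what is proved, stated in full; the proofs are below) =====
def Claim_equal_all_names : Prop := ∀ (first_names : List String) (last_names : List String) (length : Int), Dom_all_names first_names last_names length → Spec_all_names first_names last_names length (all_names first_names last_names length)

-- ===== LEMMAS AND PROOFS =====

-- B's bucket dict looked up at key k yields exactly the last names of length k, in order
theorem bucket_getD (last_names : List String) (k : Int) :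
    (last_names.foldl (fun buckets last_name =>
      buckets.insert (PySem.Str.len last_name)
        (buckets.getD (PySem.Str.len last_name) [] ++ [last_name]))
      (PySem.Dict.empty : PySem.Dict Int (List String))).getD k []
    = last_names.filter (fun l => PySem.Str.len l = k) := by
  suffices h : ∀ (d : PySem.Dict Int (List String)),
      (last_names.foldl (fun buckets last_name =>
        buckets.insert (PySem.Str.len last_name)
          (buckets.getD (PySem.Str.len last_name) [] ++ [last_name])) d).getD k []
      = d.getD k [] ++ last_names.filter (fun l => PySem.Str.len l = k) by
    simpa [PySem.Dict.getD_empty] using h PySem.Dict.empty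
  induction last_names with
  | nil => simp
  | cons l rest ih =>
    intro d
    simp only [List.foldl_cons, List.filter_cons, ih]
    by_cases hk : (l.length : Int) = k
    · subst hk
      simp
    · rw [PySem.Dict.getD_insert]
      simp [hk, Ne.symm hk]

-- A's inner scan for one first name equals the mapped matching-length bucket
theorem inner_eq (first_name : String) (last_names : List String) (length : Int)
    (valid_names : List String) :
    last_names.foldl (fun valid_names last_name =>
      let possible_name := first_name ++ " " ++ last_name
      if PySem.Str.len possible_name = length then valid_names ++ [possible_name] else valid_names)
      valid_names
    = valid_names ++ (last_names.filter
        (fun l => PySem.Str.len l = length - PySem.Str.len first_name - 1)).map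
        (fun l => first_name ++ " " ++ l) := by
  rw [show (fun (valid_names : List String) (last_name : String) =>
      let possible_name := first_name ++ " " ++ last_name
      if PySem.Str.len possible_name = length then valid_names ++ [possible_name] else valid_names)
    = fun valid_names last_name =>
      if PySem.Str.len (first_name ++ " " ++ last_name) = length
      then valid_names ++ [first_name ++ " " ++ last_name] else valid_names from rfl]
  rw [PySem.List.foldl_append_ite
    (p := fun l => PySem.Str.len (first_name ++ " " ++ l) = length)
    (f := fun l => first_name ++ " " ++ l)]
  congr 2
  apply List.filter_congr
  intro l _
  simp only [PySem.Str.len_eq, decide_eq_decide, String.toList_append, List.length_append,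
    show " ".toList.length = 1 from rfl]
  omega

theorem all_names_eq_alt (first_names last_names : List String) (length : Int) :
    all_names first_names last_names length = all_names_alt first_names last_names length := by
  unfold all_names all_names_alt
  simp only [bucket_getD, PySem.List.foldl_append_singleton_eq_map, inner_eq]

-- ===== VERDICT (by name: the statement is the Claim_ definition above) =====
theorem all_names_spec : Claim_equal_all_names := by
  intro first_names last_names length _
  exact all_names_eq_alt first_names last_names length
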